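-- pv_equiv track=rewrite | github.com/safrano9999/CODEANALYST | app.py | _extract_summary
-- ===== SOURCE A (Python) =====
-- def _extract_tldr_summary(text: str) -> str:
--     for raw in (text or "").splitlines():
--         line = raw.strip()
--         if not line.startswith(">"):
--             continue
--         line = line.lstrip(">").strip()
--         if not line or "Weitere Informationen" in line or "More information" in line:
--             continue
--         if len(line) > 180:
--             return f"{line[:177]}..."
--         return line
--     return ""
--
-- def _extract_summary(text: str) -> str:
--     tldr_summary = _extract_tldr_summary(text)
--     if tldr_summary:
--         return tldr_summary
--     for raw in (text or "").splitlines():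
--         line = raw.strip().lstrip("#>").strip()
--         if not line:
--             continue
--         if line.lower().startswith("usage:"):
--             continue
--         if len(line) > 180:
--             line = f"{line[:177]}..."
--         return line
--     return ""
-- ===== SOURCE B (Python) =====
-- def _tldr_line(raw: str):
--     stripped = raw.strip()
--     if not stripped.startswith(">"):
--         return None
--     tldr = stripped.lstrip(">").strip()
--     if not tldr or "Weitere Informationen" in tldr or "More information" in tldr:
--         return None
--     return tldr
--
-- def _fallback_line(raw: str):
--     cand = raw.strip().lstrip("#>").strip()
--     if not cand or cand.lower().startswith("usage:"):
--         return None
--     return cand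
--
-- def _truncate(line: str) -> str:
--     return line[:177] + "..." if len(line) > 180 else line
--
-- def _extract_summary(text: str) -> str:
--     fallback = None
--     for raw in (text or "").splitlines():
--         tldr = _tldr_line(raw)
--         if tldr is not None:
--             return _truncate(tldr)
--         if fallback is None:
--             fallback = _fallback_line(raw)
--     return _truncate(fallback) if fallback is not None else ""
-- ===== Notes on version B (the rewrite author's own statement) =====
-- stated objective: simpler
-- what changed: A scans the lines twice (a TL;DR pass, then a separate fallback pass); B makes a single pass that returns the first TL;DR line immediately while remembering the first fallback candidate.
import Mathlib
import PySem

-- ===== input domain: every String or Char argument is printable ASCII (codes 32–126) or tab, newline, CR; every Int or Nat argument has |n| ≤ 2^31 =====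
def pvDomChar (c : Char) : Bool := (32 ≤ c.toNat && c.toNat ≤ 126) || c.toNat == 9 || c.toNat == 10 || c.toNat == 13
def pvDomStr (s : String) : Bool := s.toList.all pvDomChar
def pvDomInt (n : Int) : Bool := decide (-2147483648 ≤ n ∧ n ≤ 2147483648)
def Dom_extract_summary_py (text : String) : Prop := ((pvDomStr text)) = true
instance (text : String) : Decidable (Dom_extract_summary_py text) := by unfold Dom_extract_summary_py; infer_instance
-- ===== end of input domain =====

-- B merges A's two passes over the lines into one pass that remembers the first fallback
-- candidate while scanning for the first TL;DR quote line (objective: alternative/simpler).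

-- shared primitive helpers (exact ports of the identical Python sub-expressions both versions use)
-- s.lstrip(">"): drop leading '>' characters (exact: lstrip with a char set drops those chars from the left)
def pvLstripGt (s : String) : String := String.ofList (s.toList.dropWhile (· == '>'))
-- s.lstrip("#>"): drop leading '#' and '>' characters (exact, same rule)
def pvLstripHashGt (s : String) : String := String.ofList (s.toList.dropWhile (fun c => c == '#' || c == '>'))
-- f"{line[:177]}..." if len(line) > 180 else line  (exact: line[:177] is take 177)
def pvTrunc (line : String) : String :=
  if 180 < PySem.Str.len line then String.ofList (line.toList.take 177 ++ "...".toList) else line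

-- the per-line test of A's TL;DR loop (its loop body up to the truncation/return)
def pvTldrLine (raw : String) : Option String :=
  let line := PySem.Str.strip raw
  if !(PySem.Str.startswith line ">") then none
  else
    let line2 := PySem.Str.strip (pvLstripGt line)
    if line2 == "" || PySem.Str.isIn "Weitere Informationen" line2
        || PySem.Str.isIn "More information" line2 then none
    else some line2

-- the per-line test of A's fallback loop (its loop body up to the truncation/return)
def pvFbLine (raw : String) : Option String :=
  let line := PySem.Str.strip (pvLstripHashGt (PySem.Str.strip raw))
  if line == "" then none
  else if PySem.Str.startswith (PySem.Str.lower line) "usage:" then none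
  else some line

-- ===== PORT A =====
-- _extract_tldr_summary's loop
def pvTldrLoop : List String → String
  | [] => ""
  | raw :: rest =>
    match pvTldrLine raw with
    | some line2 => pvTrunc line2
    | none => pvTldrLoop rest

-- _extract_summary's fallback loop
def pvFbLoop : List String → String
  | [] => ""
  | raw :: rest =>
    match pvFbLine raw with
    | some line => pvTrunc line
    | none => pvFbLoop rest

-- for a str argument, (text or "") ≡ text: "" splits to [] either way
def extract_summary_py (text : String) : String :=
  let tldr := pvTldrLoop (PySem.Str.splitlines text)
  if tldr != "" then tldr else pvFbLoop (PySem.Str.splitlines text)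

-- ===== PORT B =====
-- single pass: first TL;DR line returns at once; the first fallback candidate is remembered
def pvLoopB : List String → Option String → String
  | [], acc =>
    match acc with
    | some f => pvTrunc f
    | none => ""
  | raw :: rest, acc =>
    match pvTldrLine raw with
    | some tldr => pvTrunc tldr
    | none =>
      let acc' := match acc with
        | some _ => acc
        | none => pvFbLine raw
      pvLoopB rest acc'

def extract_summary_py_alt (text : String) : String :=
  pvLoopB (PySem.Str.splitlines text) none

-- ===== PRECONDITION & SPEC =====
def Spec_extract_summary_py (text : String) (out : String) : Prop := out = extract_summary_py_alt text
instance (text : String) (out : String) : Decidable (Spec_extract_summary_py text out) := by unfold Spec_extract_summary_py; infer_instance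

-- ===== CLAIM (what is proved, stated in full; the proofs are below) =====
def Claim_equal_extract_summary_py : Prop := ∀ (text : String), Dom_extract_summary_py text → Spec_extract_summary_py text (extract_summary_py text)

-- ===== LEMMAS AND PROOFS =====

theorem pvTrunc_ne_empty (s : String) (h : s ≠ "") : pvTrunc s ≠ "" := by
  unfold pvTrunc
  split_ifs with hlen
  · intro hc
    have := congrArg String.toList hc
    simp at this
  · exact h

theorem pvTldrLine_ne_empty (raw t : String) (h : pvTldrLine raw = some t) : t ≠ "" := by
  intro hc
  subst hc
  unfold pvTldrLine at h
  simp only [] at h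
  split_ifs at h with h1 h2; simp_all

-- B equals: first TL;DR line wins, else the remembered / first fallback candidate
theorem pvLoopB_eq (ls : List String) (acc : Option String) :
    pvLoopB ls acc =
      if pvTldrLoop ls ≠ "" then pvTldrLoop ls
      else match acc with
        | some f => pvTrunc f
        | none => pvFbLoop ls := by
  induction ls generalizing acc with
  | nil => cases acc <;> simp [pvLoopB, pvTldrLoop, pvFbLoop]
  | cons raw rest ih =>
    cases hT : pvTldrLine raw with
    | some t =>
      have hne := pvTrunc_ne_empty t (pvTldrLine_ne_empty raw t hT)
      have hA : pvTldrLoop (raw :: rest) = pvTrunc t := by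
        simp only [pvTldrLoop, hT]
      have hB : pvLoopB (raw :: rest) acc = pvTrunc t := by
        simp only [pvLoopB, hT]
      rw [hB, hA, if_pos hne]
    | none =>
      have hA : pvTldrLoop (raw :: rest) = pvTldrLoop rest := by
        simp only [pvTldrLoop, hT]
      rw [hA]
      cases acc with
      | some f =>
        have hB : pvLoopB (raw :: rest) (some f) = pvLoopB rest (some f) := by
          simp only [pvLoopB, hT]
        rw [hB]; exact ih (some f)
      | none =>
        have hB : pvLoopB (raw :: rest) none = pvLoopB rest (pvFbLine raw) := by
          simp only [pvLoopB, hT]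
        rw [hB]
        cases hF : pvFbLine raw with
        | some l =>
          have hFb : pvFbLoop (raw :: rest) = pvTrunc l := by
            simp only [pvFbLoop, hF]
          rw [hFb]; exact ih (some l)
        | none =>
          have hFb : pvFbLoop (raw :: rest) = pvFbLoop rest := by
            simp only [pvFbLoop, hF]
          rw [hFb]; exact ih none

-- ===== VERDICT (by name: the statement is the Claim_ definition above) =====
theorem extract_summary_py_spec : Claim_equal_extract_summary_py := by
  intro text _
  unfold Spec_extract_summary_py extract_summary_py extract_summary_py_alt
  rw [pvLoopB_eq]
  by_cases h : pvTldrLoop (PySem.Str.splitlines text) = ""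
  · simp [h]
  · simp [h]
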